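-- pv_equiv track=rewrite | github.com/orkosinha/cs6120impl | lesson4/df.py | cp_merge
-- ===== SOURCE A (Python) =====
-- def cp_merge(preds):
--     out = {}
--
--     for p in preds:
--         for var, val in p.items():
--             if var in out:
--                 if out[var] != val:
--                     out[var] = '?'
--             else:
--                 out[var] = val
--
--     return out
-- ===== SOURCE B (Python) =====
-- def cp_merge(preds):
--     # Two-pass: first group every value per variable (first-encountered key order),
--     # then decide each variable in one scan: its value if all collected values are
--     # equal (compared with ==), else '?'.
--     index = {}
--     for p in preds:
--         for var, val in p.items():
--             index.setdefault(var, []).append(val)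
--     out = {}
--     for var, vals in index.items():
--         first = vals[0]
--         out[var] = first if all(v == first for v in vals) else '?'
--     return out
-- ===== Notes on version B (the rewrite author's own statement) =====
-- stated objective: alternative
-- what changed: Replaces A's single fused loop that mutates the result dict on each conflict with a two-pass decomposition: one pass groups all values per variable into an index, a second pass decides each variable (its value if all collected values are equal, else '?').
import Mathlib
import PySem

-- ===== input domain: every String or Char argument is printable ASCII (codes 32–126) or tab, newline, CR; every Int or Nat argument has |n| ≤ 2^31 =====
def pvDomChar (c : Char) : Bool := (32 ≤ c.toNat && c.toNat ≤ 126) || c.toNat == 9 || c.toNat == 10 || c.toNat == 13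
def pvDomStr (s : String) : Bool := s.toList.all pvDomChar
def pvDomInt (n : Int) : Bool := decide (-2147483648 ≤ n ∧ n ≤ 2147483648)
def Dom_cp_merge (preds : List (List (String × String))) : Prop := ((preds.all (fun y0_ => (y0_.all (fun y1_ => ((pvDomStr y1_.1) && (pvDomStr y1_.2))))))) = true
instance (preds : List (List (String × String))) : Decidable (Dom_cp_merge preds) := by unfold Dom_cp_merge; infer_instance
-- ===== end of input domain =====

-- B replaces A's single fused loop with a two-pass decomposition (group all values
-- per variable, then decide each variable once); same cost, no speed claim.

-- ===== PORT A =====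
-- loop body of A: if var in out: (if out[var] != val: out[var] = '?') else: out[var] = val
def cpStepA (out : PySem.Dict String String) (vv : String × String) : PySem.Dict String String :=
  if out.contains vv.1 then
    (if out.getD vv.1 "" != vv.2 then out.insert vv.1 "?" else out)
  else out.insert vv.1 vv.2

def cp_merge (preds : List (List (String × String))) : List (String × String) :=
  (preds.foldl (fun out p => p.foldl cpStepA out) PySem.Dict.empty).items

-- ===== PORT B =====
-- loop body of B's first pass: index.setdefault(var, []).append(val)
def cpStepB (idx : PySem.Dict String (List String)) (vv : String × String) : PySem.Dict String (List String) :=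
  idx.modify vv.1 [] (fun vs => vs ++ [vv.2])

-- B's per-variable decision: vals[0] if all(v == vals[0] for v in vals) else '?'
-- ([] is unreachable: every collected list is nonempty; Python's vals[0] would raise there)
def cpDecide (vs : List String) : String :=
  match vs with
  | [] => "?"
  | first :: rest => if rest.all (fun v => v == first) then first else "?"

def cp_merge_alt (preds : List (List (String × String))) : List (String × String) :=
  let index := preds.foldl (fun idx p => p.foldl cpStepB idx) PySem.Dict.empty
  (index.items.foldl (fun out kv => PySem.Dict.insert out kv.1 (cpDecide kv.2)) PySem.Dict.empty).items

-- ===== PRECONDITION & SPEC =====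
def Spec_cp_merge (preds : List (List (String × String))) (out : List (String × String)) : Prop := out = cp_merge_alt preds
instance (preds : List (List (String × String))) (out : List (String × String)) : Decidable (Spec_cp_merge preds out) := by unfold Spec_cp_merge; infer_instance

-- ===== CLAIM (what is proved, stated in full; the proofs are below) =====
def Claim_equal_cp_merge : Prop := ∀ (preds : List (List (String × String))), Dom_cp_merge preds → Spec_cp_merge preds (cp_merge preds)

-- ===== LEMMAS AND PROOFS =====

def cpF : String × List String → String × String := fun kv => (kv.1, cpDecide kv.2)

theorem cpDecide_append (vs : List String) (v : String) (h : vs ≠ []) :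
    cpDecide (vs ++ [v]) = if cpDecide vs == v then cpDecide vs else "?" := by
  obtain ⟨a, t, rfl⟩ := List.exists_cons_of_ne_nil h
  simp only [List.cons_append, cpDecide, List.all_append, List.all_cons, List.all_nil,
    Bool.and_true]
  by_cases h1 : t.all (fun w => w == a)
  · by_cases h2 : v = a
    · simp [h1, h2]
    · simp [h1, h2, beq_iff_eq, Ne.symm h2]
  · simp [h1, beq_iff_eq]

theorem map_keep {ν : Type} (m : List (String × ν)) (k : String) (w : ν)
    (h : ∀ p ∈ m, p.1 ≠ k) :
    m.map (fun p => if p.1 == k then (k, w) else p) = m := by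
  induction m with
  | nil => rfl
  | cons a t ih =>
    rw [List.map_cons, if_neg (by simp [beq_iff_eq]; exact h a (List.mem_cons_self ..)),
      ih (fun p hp => h p (List.mem_cons_of_mem _ hp))]
theorem stepA_cons_ne (m : List (String × String)) (k₀ : String) (x : String)
    (k v : String) (h : k₀ ≠ k) :
    cpStepA (PySem.Dict.mk ((k₀, x) :: m)) (k, v)
      = PySem.Dict.mk ((k₀, x) :: (cpStepA (PySem.Dict.mk m) (k, v)).items) := by
  have hk : (k₀ == k) = false := by simp [beq_iff_eq, h]
  simp only [cpStepA, PySem.Dict.contains, PySem.Dict.getD, PySem.Dict.get?,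
    PySem.Dict.insert, PySem.Dict.items, List.any_cons, List.find?_cons, hk,
    Bool.false_or, cond_false]
  by_cases hc : m.any (fun p => p.1 == k)
  · simp only [hc, if_true]; split <;> simp [h]
  · simp [hc, h]

theorem stepB_cons_ne (m : List (String × List String)) (k₀ : String) (x : List String)
    (k v : String) (h : k₀ ≠ k) :
    cpStepB (PySem.Dict.mk ((k₀, x) :: m)) (k, v)
      = PySem.Dict.mk ((k₀, x) :: (cpStepB (PySem.Dict.mk m) (k, v)).items) := by
  have hk : (k₀ == k) = false := by simp [beq_iff_eq, h]
  simp only [cpStepB, PySem.Dict.modify, PySem.Dict.contains, PySem.Dict.getD, PySem.Dict.get?,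
    PySem.Dict.insert, PySem.Dict.items, List.any_cons, List.find?_cons, hk,
    Bool.false_or, cond_false]
  by_cases hc : m.any (fun p => p.1 == k)
  · simp [hc, h]
  · simp [hc, h]

theorem step_comm (l : List (String × List String))
    (hnd : (l.map Prod.fst).Nodup) (hne : ∀ kv ∈ l, kv.2 ≠ []) (k v : String) :
    cpStepA (PySem.Dict.mk (l.map cpF)) (k, v)
      = PySem.Dict.mk ((cpStepB (PySem.Dict.mk l) (k, v)).items.map cpF) := by
  induction l with
  | nil =>
    simp [cpStepA, cpStepB, PySem.Dict.modify, PySem.Dict.insert, PySem.Dict.contains,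
      PySem.Dict.getD, PySem.Dict.get?, cpF, cpDecide]
  | cons a t ih =>
    obtain ⟨k₀, vs₀⟩ := a
    by_cases hk : k₀ = k
    · subst hk
      -- head matches: k ∉ keys of t
      have hnotin : ∀ p ∈ t, p.1 ≠ k₀ := by
        intro p hp
        have := (List.nodup_cons.mp hnd).1
        intro hpk; exact this (hpk ▸ List.mem_map.mpr ⟨p, hp, rfl⟩)
      have hnotinF : ∀ p ∈ t.map cpF, p.1 ≠ k₀ := by
        intro p hp
        obtain ⟨q, hq, rfl⟩ := List.mem_map.mp hp
        exact hnotin q hq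
      have hvs : vs₀ ≠ [] := hne (k₀, vs₀) (List.mem_cons_self ..)
      simp only [cpStepA, cpStepB, PySem.Dict.modify, PySem.Dict.insert, PySem.Dict.contains,
        PySem.Dict.getD, PySem.Dict.get?, PySem.Dict.items, List.map_cons, cpF,
        List.any_cons, List.find?_cons, beq_self_eq_true, Bool.true_or, if_true,
        Option.map_some, Option.getD_some]
      rw [map_keep _ _ _ hnotinF, map_keep _ _ _ hnotin, cpDecide_append _ _ hvs]
      by_cases he : cpDecide vs₀ = v
      · simp [he]
      · simp [he, bne_iff_ne, beq_iff_eq]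
    · rw [show ((k₀, vs₀) :: t).map cpF = (k₀, cpDecide vs₀) :: t.map cpF from rfl,
        stepA_cons_ne _ _ _ _ _ hk, stepB_cons_ne _ _ _ _ _ hk]
      have ih' := ih (List.nodup_cons.mp hnd).2 (fun kv hkv => hne kv (List.mem_cons_of_mem _ hkv)) 
      rw [ih']; simp [cpF]

theorem stepB_nodup (idx : PySem.Dict String (List String)) (vv : String × String)
    (h : idx.keys.Nodup) : (cpStepB idx vv).keys.Nodup :=
  PySem.Dict.nodup_keys_insert _ _ _ h

theorem stepB_nonempty (idx : PySem.Dict String (List String)) (vv : String × String)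
    (h : ∀ vs ∈ idx.values, vs ≠ []) : ∀ vs ∈ (cpStepB idx vv).values, vs ≠ [] := by
  intro vs hvs
  simp only [cpStepB, PySem.Dict.modify] at hvs
  rcases PySem.Dict.mem_values_insert _ _ _ _ hvs with rfl | hmem
  · simp
  · exact h vs hmem

theorem foldB_nodup (p : List (String × String)) (idx : PySem.Dict String (List String))
    (h : idx.keys.Nodup) : (p.foldl cpStepB idx).keys.Nodup := by
  induction p generalizing idx with
  | nil => exact h
  | cons vv t ih => exact ih _ (stepB_nodup idx vv h)

theorem foldB_nonempty (p : List (String × String)) (idx : PySem.Dict String (List String))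
    (h : ∀ vs ∈ idx.values, vs ≠ []) : ∀ vs ∈ (p.foldl cpStepB idx).values, vs ≠ [] := by
  induction p generalizing idx with
  | nil => exact h
  | cons vv t ih => exact ih _ (stepB_nonempty idx vv h)

theorem hne_of_values {idx : PySem.Dict String (List String)}
    (h : ∀ vs ∈ idx.values, vs ≠ []) : ∀ kv ∈ idx.items, kv.2 ≠ [] := by
  intro kv hkv
  exact h kv.2 (List.mem_map.mpr ⟨kv, hkv, rfl⟩)

theorem inner_fold (p : List (String × String)) (idx : PySem.Dict String (List String))
    (hnd : idx.keys.Nodup) (hne : ∀ vs ∈ idx.values, vs ≠ []) :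
    p.foldl cpStepA (PySem.Dict.mk (idx.items.map cpF))
      = PySem.Dict.mk ((p.foldl cpStepB idx).items.map cpF) := by
  induction p generalizing idx with
  | nil => rfl
  | cons vv t ih =>
    obtain ⟨k, v⟩ := vv
    rw [List.foldl_cons, List.foldl_cons]
    have hstep := step_comm idx.items hnd (hne_of_values hne) k v
    rw [show PySem.Dict.mk idx.items = idx from rfl] at hstep
    rw [hstep]
    exact ih (cpStepB idx (k, v)) (stepB_nodup idx (k, v) hnd) (stepB_nonempty idx (k, v) hne)

theorem foldsB_nodup (preds : List (List (String × String))) (idx : PySem.Dict String (List String))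
    (h : idx.keys.Nodup) : (preds.foldl (fun i p => p.foldl cpStepB i) idx).keys.Nodup := by
  induction preds generalizing idx with
  | nil => exact h
  | cons p t ih => exact ih _ (foldB_nodup p idx h)

theorem outer_fold (preds : List (List (String × String))) (idx : PySem.Dict String (List String))
    (hnd : idx.keys.Nodup) (hne : ∀ vs ∈ idx.values, vs ≠ []) :
    preds.foldl (fun out p => p.foldl cpStepA out) (PySem.Dict.mk (idx.items.map cpF))
      = PySem.Dict.mk ((preds.foldl (fun i p => p.foldl cpStepB i) idx).items.map cpF) := by
  induction preds generalizing idx with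
  | nil => rfl
  | cons p t ih =>
    rw [List.foldl_cons, List.foldl_cons, inner_fold p idx hnd hne]
    exact ih _ (foldB_nodup p idx hnd) (foldB_nonempty p idx hne)

theorem cp_merge_eq_alt (preds : List (List (String × String))) :
    cp_merge preds = cp_merge_alt preds := by
  have hnd0 : (PySem.Dict.empty : PySem.Dict String (List String)).keys.Nodup := by
    simp [PySem.Dict.keys, PySem.Dict.empty]
  have hne0 : ∀ vs ∈ (PySem.Dict.empty : PySem.Dict String (List String)).values, vs ≠ [] := by
    intro vs hvs; simp [PySem.Dict.values, PySem.Dict.empty] at hvs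
  have h := congrArg PySem.Dict.items (outer_fold preds PySem.Dict.empty hnd0 hne0)
  have halt : cp_merge_alt preds
      = List.map cpF (preds.foldl (fun i p => p.foldl cpStepB i) PySem.Dict.empty).items := by
    show ((preds.foldl (fun i p => p.foldl cpStepB i) PySem.Dict.empty).items.foldl
        (fun out kv => PySem.Dict.insert out kv.1 (cpDecide kv.2)) PySem.Dict.empty).items = _
    rw [PySem.Dict.items_foldl_insert_fresh _ _ _ _ (fun a _ => rfl)
      (foldsB_nodup preds PySem.Dict.empty hnd0)]
    simp [cpF, PySem.Dict.empty]
  rw [halt]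
  exact h

-- ===== VERDICT (by name: the statement is the Claim_ definition above) =====
theorem cp_merge_spec : Claim_equal_cp_merge := by
  intro preds _
  show cp_merge preds = cp_merge_alt preds
  exact cp_merge_eq_alt preds
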